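-- pv_equiv track=rewrite | github.com/kehuo/algorithm_py3 | lc/2020/Mar_15_case_180/test_page_2.py | func
-- ===== SOURCE A (Python) =====
-- from itertools import combinations
--
-- def func(n, speed, efficiency, k):
--     """暴力法 -- 已在leetcode证明, 没有计算的错误, 但是会超出时间限制"""
--     total = []
--     for idx in range(n):
--         total.append((speed[idx], efficiency[idx]))
--
--     max_p = None
--     for i in range(1, k + 1):
--         curr_array = combinations(total, i)
--         for each in curr_array:
--             A = sum([j[0] for j in each])
--             B = min([j[1] for j in each])
--             curr_max_p = A * B
--
--             if max_p is None:
--                 max_p = curr_max_p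
--             else:
--                 if max_p < curr_max_p:
--                     max_p = curr_max_p
--     return max_p
-- ===== SOURCE B (Python) =====
-- def func(n, speed, efficiency, k):
--     """DFS over take/skip decisions with running (sum, min) accumulators,
--     instead of materializing combinations per size and re-aggregating each."""
--     items = [(speed[i], efficiency[i]) for i in range(n)]
--
--     def ext(i, cap, s, m):
--         # best s'*m' reachable by adding <= cap further items from items[i:]
--         if cap == 0 or i == len(items):
--             return s * m
--         sp, ef = items[i]
--         return max(ext(i + 1, cap - 1, s + sp, min(m, ef)),
--                    ext(i + 1, cap, s, m))
--
--     def start(i, cap):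
--         # best over nonempty subsets of items[i:] of size <= cap, or None
--         if cap <= 0 or i == len(items):
--             return None
--         sp, ef = items[i]
--         w = ext(i + 1, cap - 1, sp, ef)
--         rest = start(i + 1, cap)
--         return w if rest is None else max(w, rest)
--
--     return start(0, k)
-- ===== Notes on version B (the rewrite author's own statement) =====
-- stated objective: alternative
-- what changed: Replaces the per-size itertools.combinations enumeration, which rebuilds and re-aggregates sum/min of every combination, by a single take-or-skip DFS that carries the running speed sum and running minimum efficiency as accumulators.
import Mathlib
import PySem

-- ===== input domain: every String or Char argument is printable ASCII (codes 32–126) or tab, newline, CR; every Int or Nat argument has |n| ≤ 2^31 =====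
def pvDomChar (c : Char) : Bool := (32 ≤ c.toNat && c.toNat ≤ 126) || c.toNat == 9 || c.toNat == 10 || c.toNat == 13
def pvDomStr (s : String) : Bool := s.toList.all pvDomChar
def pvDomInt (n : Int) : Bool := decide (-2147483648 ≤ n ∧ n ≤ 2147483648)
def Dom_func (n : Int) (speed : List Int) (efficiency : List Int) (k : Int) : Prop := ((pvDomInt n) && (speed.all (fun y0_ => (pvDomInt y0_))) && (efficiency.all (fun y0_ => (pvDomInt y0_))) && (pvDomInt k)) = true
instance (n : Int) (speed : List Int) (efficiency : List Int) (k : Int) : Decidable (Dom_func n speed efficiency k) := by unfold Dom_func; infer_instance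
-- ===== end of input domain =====

-- B replaces A's per-size itertools.combinations enumeration (re-aggregating sum/min of
-- each combination) by one take-or-skip DFS carrying running (sum, min) accumulators.

-- ===== PORT A =====
-- itertools.combinations(xs, i), in itertools' emission order
def combA : Nat → List (Int × Int) → List (List (Int × Int))
  | 0, _ => [[]]
  | _ + 1, [] => []
  | i + 1, x :: xs => (combA i xs).map (x :: ·) ++ combA (i + 1) xs

-- Python min(list); the [] case is unreachable in func (combinations of size i ≥ 1)
def pyMinList : List Int → Int
  | [] => 0
  | h :: t => t.foldl min h

def func (n : Int) (speed : List Int) (efficiency : List Int) (k : Int) : Option Int :=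
  match (PySem.List.pyRange 0 n 1).foldl
      (fun acc idx => do
        let t ← acc
        let s ← PySem.List.pyGet? speed idx
        let e ← PySem.List.pyGet? efficiency idx
        pure (t ++ [(s, e)])) (some []) with
  | none => none   -- IndexError (excluded by Pre_func)
  | some total =>
    (PySem.List.pyRange 1 (k + 1) 1).foldl (fun maxp i =>
      (combA i.toNat total).foldl (fun maxp each =>
        let A := (each.map Prod.fst).sum
        let B := pyMinList (each.map Prod.snd)
        let c := A * B
        match maxp with
        | none => some c
        | some m => if m < c then some c else some m) maxp) none

-- ===== PORT B =====
-- ext(i, cap, s, m): best s'*m' reachable adding ≤ cap further items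
def extB : Int → Int → Int → List (Int × Int) → Int
  | _, s, m, [] => s * m
  | cap, s, m, (sp, ef) :: rest =>
    if cap = 0 then s * m
    else max (extB (cap - 1) (s + sp) (min m ef) rest) (extB cap s m rest)

-- start(i, cap): best over nonempty subsets of items[i:] of size ≤ cap, or None
def startB : Int → List (Int × Int) → Option Int
  | _, [] => none
  | cap, (sp, ef) :: rest =>
    if cap ≤ 0 then none
    else
      let w := extB (cap - 1) sp ef rest
      match startB cap rest with
      | none => some w
      | some b => some (max w b)

def func_alt (n : Int) (speed : List Int) (efficiency : List Int) (k : Int) : Option Int :=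
  match (PySem.List.pyRange 0 n 1).mapM (fun i => do
      let s ← PySem.List.pyGet? speed i
      let e ← PySem.List.pyGet? efficiency i
      pure (s, e)) with
  | none => none   -- IndexError (excluded by Pre_func)
  | some items => startB k items

-- ===== PRECONDITION & SPEC =====
-- Pre_ excludes exactly the inputs where A raises IndexError (n exceeds a list length).
def Pre_func (n : Int) (speed : List Int) (efficiency : List Int) (_k : Int) : Prop :=
  n ≤ (speed.length : Int) ∧ n ≤ (efficiency.length : Int)
instance (n : Int) (speed : List Int) (efficiency : List Int) (k : Int) : Decidable (Pre_func n speed efficiency k) := by unfold Pre_func; infer_instance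

def pvWitness_func : Int × List Int × List Int × Int := (2, [1, 2], [3, 1], 2)

def Spec_func (n : Int) (speed : List Int) (efficiency : List Int) (k : Int) (out : Option Int) : Prop := out = func_alt n speed efficiency k
instance (n : Int) (speed : List Int) (efficiency : List Int) (k : Int) (out : Option Int) : Decidable (Spec_func n speed efficiency k out) := by unfold Spec_func; infer_instance

-- ===== CLAIM (what is proved, stated in full; the proofs are below) =====
def Claim_equal_func : Prop := ∀ (n : Int) (speed : List Int) (efficiency : List Int) (k : Int), Dom_func n speed efficiency k → Pre_func n speed efficiency k → Spec_func n speed efficiency k (func n speed efficiency k)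

-- ===== LEMMAS AND PROOFS =====

-- value of a chosen nonempty combination
def pvVal (l : List (Int × Int)) : Int := (l.map Prod.fst).sum * pyMinList (l.map Prod.snd)

-- value of a combination extending accumulators (s, m)
def pvVfrom (s m : Int) (l : List (Int × Int)) : Int :=
  (s + (l.map Prod.fst).sum) * ((l.map Prod.snd).foldl min m)

-- sublists of length ≤ cap (the search tree of extB)
def pvSubs : Int → List (Int × Int) → List (List (Int × Int))
  | _, [] => [[]]
  | c, x :: xs => if c = 0 then [[]] else (pvSubs (c - 1) xs).map (x :: ·) ++ pvSubs c xs

-- nonempty sublists of length ≤ cap (the search tree of startB)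
def pvNsubs : Int → List (Int × Int) → List (List (Int × Int))
  | _, [] => []
  | c, x :: xs => if c ≤ 0 then [] else (pvSubs (c - 1) xs).map (x :: ·) ++ pvNsubs c xs

-- the list A enumerates
def pvCands (k : Int) (t : List (Int × Int)) : List (List (Int × Int)) :=
  (PySem.List.pyRange 1 (k + 1) 1).flatMap (fun i => combA i.toNat t)


-- Option-valued max combiner (shape of both running maxima)
def pvOmax : Option Int → Option Int → Option Int
  | none, o => o
  | some a, none => some a
  | some a, some b => some (max a b)

-- A's running-max update
def pvUpd : Option Int → Int → Option Int
  | none, c => some c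
  | some m, c => if m < c then some c else some m

lemma pv_foldl_max_comm (t : List Int) : ∀ a b, t.foldl max (max a b) = max a (t.foldl max b) := by
  induction t with
  | nil => intro a b; rfl
  | cons c t ih =>
    intro a b
    simp only [List.foldl_cons, max_assoc]
    exact ih a (max b c)

lemma pv_max?_append (l1 l2 : List Int) : (l1 ++ l2).max? = pvOmax l1.max? l2.max? := by
  cases l1 with
  | nil => cases l2 <;> rfl
  | cons h t =>
    cases l2 with
    | nil => simp [List.max?, pvOmax]
    | cons h2 t2 =>
      simp only [List.cons_append, List.max?, pvOmax, List.foldl_append, List.foldl_cons]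
      rw [← pv_foldl_max_comm]

lemma pv_max?_mem {L : List Int} {m : Int} (h : L.max? = some m) : m ∈ L := by
  cases L with
  | nil => simp [List.max?] at h
  | cons a t =>
    simp only [List.max?, Option.some.injEq] at h
    rcases PySem.List.foldl_max_mem t a with h' | h'
    · rw [← h, h']; exact List.mem_cons_self
    · rw [← h]; exact List.mem_cons_of_mem _ h'

lemma pv_max?_isMax {L : List Int} {m : Int} (h : L.max? = some m) : ∀ b ∈ L, b ≤ m := by
  cases L with
  | nil => simp
  | cons a t =>
    simp only [List.max?, Option.some.injEq] at h
    intro b hb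
    rcases List.mem_cons.1 hb with rfl | hb
    · rw [← h]; exact (PySem.List.le_foldl_max t b).1
    · rw [← h]; exact (PySem.List.le_foldl_max t a).2 b hb

lemma pv_max?_eq_of_mem_iff {L1 L2 : List Int} (h : ∀ a, a ∈ L1 ↔ a ∈ L2) : L1.max? = L2.max? := by
  cases h1 : L1.max? with
  | none =>
    rw [List.max?_eq_none_iff] at h1
    cases h2 : L2.max? with
    | none => rfl
    | some m2 => exact absurd ((h m2).2 (pv_max?_mem h2)) (by simp [h1])
  | some m1 =>
    cases h2 : L2.max? with
    | none =>
      rw [List.max?_eq_none_iff] at h2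
      exact absurd ((h m1).1 (pv_max?_mem h1)) (by simp [h2])
    | some m2 =>
      have a1 : m1 ≤ m2 := pv_max?_isMax h2 m1 ((h m1).1 (pv_max?_mem h1))
      have a2 : m2 ≤ m1 := pv_max?_isMax h1 m2 ((h m2).2 (pv_max?_mem h2))
      rw [le_antisymm a1 a2]

lemma pvUpd_some (m c : Int) : pvUpd (some m) c = some (max m c) := by
  simp only [pvUpd]
  rcases lt_or_ge m c with h | h
  · rw [if_pos h, max_eq_right h.le]
  · rw [if_neg (not_lt.2 h), max_eq_left h]

lemma pv_foldl_upd_some (cs : List Int) : ∀ m, cs.foldl pvUpd (some m) = some (cs.foldl max m) := by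
  induction cs with
  | nil => intro m; rfl
  | cons c t ih => intro m; simp only [List.foldl_cons, pvUpd_some]; exact ih _

lemma pv_foldl_upd_none (cs : List Int) : cs.foldl pvUpd none = cs.max? := by
  cases cs with
  | nil => rfl
  | cons c t =>
    simp only [List.foldl_cons, List.max?]
    exact pv_foldl_upd_some t c

-- ===== A-side characterization =====
lemma func_loop_eq (t : List (Int × Int)) (k : Int) :
    (PySem.List.pyRange 1 (k + 1) 1).foldl (fun maxp i =>
      (combA i.toNat t).foldl (fun maxp each =>
        let A := (each.map Prod.fst).sum
        let B := pyMinList (each.map Prod.snd)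
        let c := A * B
        match maxp with
        | none => some c
        | some m => if m < c then some c else some m) maxp) none
    = ((pvCands k t).map pvVal).max? := by
  have hbody : ∀ (mp : Option Int) (each : List (Int × Int)),
      (let A := (each.map Prod.fst).sum
       let B := pyMinList (each.map Prod.snd)
       let c := A * B
       match mp with
       | none => some c
       | some m => if m < c then some c else some m) = pvUpd mp (pvVal each) := by
    intro mp each; cases mp <;> rfl
  calc (PySem.List.pyRange 1 (k + 1) 1).foldl (fun maxp i =>
      (combA i.toNat t).foldl (fun maxp each =>
        let A := (each.map Prod.fst).sum
        let B := pyMinList (each.map Prod.snd)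
        let c := A * B
        match maxp with
        | none => some c
        | some m => if m < c then some c else some m) maxp) none
      = ((pvCands k t).map pvVal).foldl pvUpd none := by
        simp only [hbody, pvCands, List.map_flatMap, List.foldl_flatMap, List.foldl_map]
    _ = ((pvCands k t).map pvVal).max? := pv_foldl_upd_none _

-- ===== B-side characterization =====
lemma pvVfrom_cons (s m sp ef : Int) (l : List (Int × Int)) :
    pvVfrom s m ((sp, ef) :: l) = pvVfrom (s + sp) (min m ef) l := by
  simp only [pvVfrom, List.map_cons, List.sum_cons, List.foldl_cons]
  ring_nf

lemma pvVal_cons (sp ef : Int) (l : List (Int × Int)) :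
    pvVal ((sp, ef) :: l) = pvVfrom sp ef l := by
  simp [pvVal, pvVfrom, pyMinList]

lemma extB_eq : ∀ (items : List (Int × Int)) (cap s m : Int),
    some (extB cap s m items) = ((pvSubs cap items).map (pvVfrom s m)).max? := by
  intro items
  induction items with
  | nil =>
    intro cap s m
    simp [extB, pvSubs, pvVfrom, List.max?]
  | cons x rest ih =>
    intro cap s m
    obtain ⟨sp, ef⟩ := x
    by_cases hc : cap = 0
    · subst hc
      simp [extB, pvSubs, pvVfrom, List.max?]
    · rw [show extB cap s m ((sp, ef) :: rest)
            = max (extB (cap - 1) (s + sp) (min m ef) rest) (extB cap s m rest) by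
          simp [extB, hc]]
      rw [show pvSubs cap ((sp, ef) :: rest)
            = (pvSubs (cap - 1) rest).map ((sp, ef) :: ·) ++ pvSubs cap rest by
          simp [pvSubs, hc]]
      rw [List.map_append, pv_max?_append, List.map_map]
      have hm : (pvSubs (cap - 1) rest).map (pvVfrom s m ∘ ((sp, ef) :: ·))
          = (pvSubs (cap - 1) rest).map (pvVfrom (s + sp) (min m ef)) := by
        apply List.map_congr_left
        intro l _
        simp [Function.comp, pvVfrom_cons]
      rw [hm, ← ih, ← ih]
      rfl

lemma startB_eq : ∀ (items : List (Int × Int)) (cap : Int),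
    startB cap items = ((pvNsubs cap items).map pvVal).max? := by
  intro items
  induction items with
  | nil => intro cap; rfl
  | cons x rest ih =>
    intro cap
    obtain ⟨sp, ef⟩ := x
    by_cases hc : cap ≤ 0
    · simp [startB, pvNsubs, hc, List.max?]
    · rw [show startB cap ((sp, ef) :: rest)
            = (match startB cap rest with
               | none => some (extB (cap - 1) sp ef rest)
               | some b => some (max (extB (cap - 1) sp ef rest) b)) by
          simp [startB, hc]]
      rw [show pvNsubs cap ((sp, ef) :: rest)
            = (pvSubs (cap - 1) rest).map ((sp, ef) :: ·) ++ pvNsubs cap rest by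
          simp [pvNsubs, hc]]
      rw [List.map_append, pv_max?_append, List.map_map]
      have hm : (pvSubs (cap - 1) rest).map (pvVal ∘ ((sp, ef) :: ·))
          = (pvSubs (cap - 1) rest).map (pvVfrom sp ef) := by
        apply List.map_congr_left
        intro l _
        simp [Function.comp, pvVal_cons]
      rw [hm, ← extB_eq, ← ih]
      cases startB cap rest <;> rfl

-- ===== membership characterizations =====
lemma mem_combA : ∀ (t : List (Int × Int)) (i : Nat) (l : List (Int × Int)),
    l ∈ combA i t ↔ l.Sublist t ∧ l.length = i := by
  intro t
  induction t with
  | nil =>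
    intro i l
    cases i with
    | zero => simp [combA, List.length_eq_zero_iff]
    | succ j =>
      simp only [combA, List.not_mem_nil, false_iff, not_and]
      intro hs
      rw [List.sublist_nil.1 hs]
      simp
  | cons x xs ih =>
    intro i l
    cases i with
    | zero =>
      simp only [combA, List.mem_singleton]
      constructor
      · rintro rfl; simp
      · rintro ⟨_, hl⟩; exact List.length_eq_zero_iff.1 hl
    | succ j =>
      simp only [combA, List.mem_append, List.mem_map, ih, List.sublist_cons_iff]
      constructor
      · rintro (⟨r, ⟨hr, hlen⟩, rfl⟩ | ⟨hs, hlen⟩)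
        · exact ⟨Or.inr ⟨r, rfl, hr⟩, by simp [hlen]⟩
        · exact ⟨Or.inl hs, hlen⟩
      · rintro ⟨hs | ⟨r, rfl, hr⟩, hlen⟩
        · exact Or.inr ⟨hs, hlen⟩
        · exact Or.inl ⟨r, ⟨hr, by simpa using hlen⟩, rfl⟩

lemma mem_pvSubs : ∀ (xs : List (Int × Int)) (c : Int), 0 ≤ c → ∀ (l : List (Int × Int)),
    (l ∈ pvSubs c xs ↔ l.Sublist xs ∧ (l.length : Int) ≤ c) := by
  intro xs
  induction xs with
  | nil =>
    intro c hc l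
    simp only [pvSubs, List.mem_singleton, List.sublist_nil]
    constructor
    · rintro rfl; simpa using hc
    · rintro ⟨rfl, _⟩; rfl
  | cons x t ih =>
    intro c hc l
    by_cases h0 : c = 0
    · subst h0
      rw [show pvSubs (0 : Int) (x :: t) = [[]] by simp [pvSubs]]
      simp only [List.mem_singleton]
      constructor
      · rintro rfl; simp
      · rintro ⟨_, hl⟩
        have : l.length = 0 := by omega
        exact List.length_eq_zero_iff.1 this
    · rw [show pvSubs c (x :: t) = (pvSubs (c - 1) t).map (x :: ·) ++ pvSubs c t by
        simp [pvSubs, h0]]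
      have hc1 : (0 : Int) ≤ c - 1 := by omega
      simp only [List.mem_append, List.mem_map, ih (c - 1) hc1, ih c hc,
        List.sublist_cons_iff]
      constructor
      · rintro (⟨r, ⟨hr, hlen⟩, rfl⟩ | ⟨hs, hlen⟩)
        · refine ⟨Or.inr ⟨r, rfl, hr⟩, ?_⟩
          simp only [List.length_cons]
          push_cast
          omega
        · exact ⟨Or.inl hs, hlen⟩
      · rintro ⟨hs | ⟨r, rfl, hr⟩, hlen⟩
        · exact Or.inr ⟨hs, hlen⟩
        · refine Or.inl ⟨r, ⟨hr, ?_⟩, rfl⟩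
          simp only [List.length_cons] at hlen
          push_cast at hlen ⊢
          omega

lemma mem_pvNsubs : ∀ (xs : List (Int × Int)) (c : Int) (l : List (Int × Int)),
    (l ∈ pvNsubs c xs ↔ l.Sublist xs ∧ l ≠ [] ∧ (l.length : Int) ≤ c) := by
  intro xs
  induction xs with
  | nil =>
    intro c l
    simp only [pvNsubs, List.not_mem_nil, false_iff, not_and, List.sublist_nil]
    rintro rfl h
    exact absurd rfl h
  | cons x t ih =>
    intro c l
    by_cases hc : c ≤ 0
    · rw [show pvNsubs c (x :: t) = [] by simp [pvNsubs, hc]]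
      simp only [List.not_mem_nil, false_iff, not_and]
      intro _ hne hlen
      have : 0 < l.length := List.length_pos_of_ne_nil hne
      omega
    · rw [show pvNsubs c (x :: t) = (pvSubs (c - 1) t).map (x :: ·) ++ pvNsubs c t by
        simp [pvNsubs, hc]]
      have hc1 : (0 : Int) ≤ c - 1 := by omega
      simp only [List.mem_append, List.mem_map, mem_pvSubs t (c - 1) hc1, ih c,
        List.sublist_cons_iff]
      constructor
      · rintro (⟨r, ⟨hr, hlen⟩, rfl⟩ | ⟨hs, hne, hlen⟩)
        · refine ⟨Or.inr ⟨r, rfl, hr⟩, List.cons_ne_nil _ _, ?_⟩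
          simp only [List.length_cons]; push_cast; omega
        · exact ⟨Or.inl hs, hne, hlen⟩
      · rintro ⟨hs | ⟨r, rfl, hr⟩, hne, hlen⟩
        · exact Or.inr ⟨hs, hne, hlen⟩
        · refine Or.inl ⟨r, ⟨hr, ?_⟩, rfl⟩
          simp only [List.length_cons] at hlen; push_cast at hlen ⊢; omega

lemma mem_pvCands (t : List (Int × Int)) (k : Int) (l : List (Int × Int)) :
    l ∈ pvCands k t ↔ l.Sublist t ∧ l ≠ [] ∧ (l.length : Int) ≤ k := by
  simp only [pvCands, List.mem_flatMap, PySem.List.mem_pyRange_one, mem_combA]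
  constructor
  · rintro ⟨i, ⟨h1, h2⟩, hs, hlen⟩
    have hi : (0 : Int) ≤ i := by omega
    have : (l.length : Int) = i := by rw [hlen]; exact Int.toNat_of_nonneg hi
    refine ⟨hs, ?_, by omega⟩
    intro hnil
    rw [hnil] at this
    simp at this
    omega
  · rintro ⟨hs, hne, hlen⟩
    have hpos : 0 < l.length := List.length_pos_of_ne_nil hne
    refine ⟨(l.length : Int), ⟨by omega, by omega⟩, hs, ?_⟩
    simp

-- ===== building the pair list =====
lemma pv_foldl_build_none (g1 g2 : Int → Option Int) (l : List Int) :
    l.foldl (fun acc idx => do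
      let tt ← acc
      let s ← g1 idx
      let e ← g2 idx
      pure (tt ++ [(s, e)])) (none : Option (List (Int × Int))) = none := by
  induction l with
  | nil => rfl
  | cons x xs ih => simpa using ih

lemma pv_foldl_build (g1 g2 : Int → Option Int) :
    ∀ (l : List Int) (t : List (Int × Int)),
    l.foldl (fun acc idx => do
      let tt ← acc
      let s ← g1 idx
      let e ← g2 idx
      pure (tt ++ [(s, e)])) (some t)
    = (l.mapM (fun i => do
        let s ← g1 i
        let e ← g2 i
        pure ((s, e) : Int × Int))).map (fun r => t ++ r) := by
  intro l
  induction l with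
  | nil => intro t; simp
  | cons x xs ih =>
    intro t
    rw [List.foldl_cons, List.mapM_cons]
    cases hx : g1 x with
    | none =>
      rw [show (do
            let tt ← some (α := List (Int × Int)) t
            let s ← (none : Option Int)
            let e ← g2 x
            pure (tt ++ [(s, e)])) = (none : Option (List (Int × Int))) from rfl]
      rw [pv_foldl_build_none]
      rfl
    | some sv =>
      cases he : g2 x with
      | none =>
        rw [show (do
              let tt ← some (α := List (Int × Int)) t
              let s ← some sv
              let e ← (none : Option Int)
              pure (tt ++ [(s, e)])) = (none : Option (List (Int × Int))) from rfl]
        rw [pv_foldl_build_none]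
        rfl
      | some ev =>
        rw [show (do
              let tt ← some (α := List (Int × Int)) t
              let s ← some sv
              let e ← some ev
              pure (tt ++ [(s, e)])) = some (t ++ [(sv, ev)]) from rfl]
        rw [ih (t ++ [(sv, ev)])]
        cases hxs : xs.mapM (fun i => do
            let s ← g1 i
            let e ← g2 i
            pure ((s, e) : Int × Int)) <;> simp

-- ===== VERDICT (by name: the statement is the Claim_ definition above) =====
theorem func_spec : Claim_equal_func := by
  intro n speed efficiency k _ _
  unfold Spec_func func func_alt
  rw [pv_foldl_build (PySem.List.pyGet? speed) (PySem.List.pyGet? efficiency)]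
  cases h : (PySem.List.pyRange 0 n 1).mapM (fun i => do
      let s ← PySem.List.pyGet? speed i
      let e ← PySem.List.pyGet? efficiency i
      pure ((s, e) : Int × Int)) with
  | none => rfl
  | some total =>
    simp only [Option.map_some, List.nil_append]
    rw [func_loop_eq, startB_eq]
    apply pv_max?_eq_of_mem_iff
    intro a
    simp only [List.mem_map]
    constructor
    · rintro ⟨l, hl, rfl⟩
      exact ⟨l, (mem_pvNsubs total k l).2 ((mem_pvCands total k l).1 hl), rfl⟩
    · rintro ⟨l, hl, rfl⟩
      exact ⟨l, (mem_pvCands total k l).2 ((mem_pvNsubs total k l).1 hl), rfl⟩
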